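-- pv_equiv track=rewrite | github.com/gangpeng/zmq | tests/e2e_test.py | env_phase_token
-- ===== SOURCE A (Python) =====
-- def env_phase_token(name):
--     token = []
--     for ch in name.upper():
--         if ch.isalnum():
--             token.append(ch)
--         else:
--             token.append("_")
--     collapsed = "_".join(part for part in "".join(token).split("_") if part)
--     if not collapsed:
--         raise AssertionError("empty E2E chaos phase name")
--     return collapsed
-- ===== SOURCE B (Python) =====
-- def env_phase_token(name):
--     out = []
--     for ch in name.upper():
--         if ch.isalnum():
--             out.append(ch)
--         elif out and out[-1] != "_":
--             out.append("_")
--     if out and out[-1] == "_":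
--         out = out[:-1]
--     if not out:
--         raise AssertionError("empty E2E chaos phase name")
--     return "".join(out)
-- ===== Notes on version B (the rewrite author's own statement) =====
-- stated objective: alternative
-- what changed: Replaced A's map-every-char-then-split-on-'_'-filter-join pipeline with a single-pass state machine that appends alnum chars and emits at most one separating '_' (never leading, one trailing '_' stripped at the end).
import Mathlib
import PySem

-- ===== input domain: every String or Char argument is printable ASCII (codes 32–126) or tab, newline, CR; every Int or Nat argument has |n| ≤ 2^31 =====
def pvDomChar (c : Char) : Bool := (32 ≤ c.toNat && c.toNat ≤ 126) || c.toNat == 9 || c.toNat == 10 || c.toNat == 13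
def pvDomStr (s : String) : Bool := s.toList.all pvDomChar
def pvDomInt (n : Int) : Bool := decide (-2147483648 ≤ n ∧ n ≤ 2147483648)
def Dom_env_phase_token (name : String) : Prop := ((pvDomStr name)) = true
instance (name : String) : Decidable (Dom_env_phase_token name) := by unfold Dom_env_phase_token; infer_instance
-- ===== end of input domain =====

-- B replaces A's map-then-split/join pipeline by a single-pass state machine; same return value on Pre_ (an alternative decomposition, no speed claim).

-- ===== PORT A =====
def env_phase_token (name : String) : String :=
  -- token = the loop appending ch or '_'; collapsed = "_".join(nonempty parts of token.split("_"))
  -- Python raises AssertionError when collapsed is empty: excluded by Pre_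
  String.ofList (PySem.Chars.join ['_']
    ((PySem.Chars.splitOn
        ((PySem.Chars.upper name.toList).foldl
          (fun acc ch => if PySem.Chars.isalnum ch then acc ++ [ch] else acc ++ ['_']) [])
        ['_']).filter (fun part => part ≠ [])))

-- ===== PORT B =====
def pvBLoop (name : String) : List Char :=
  (PySem.Chars.upper name.toList).foldl
    (fun acc ch =>
      if PySem.Chars.isalnum ch then acc ++ [ch]
      else if acc ≠ [] ∧ acc.getLast? ≠ some '_' then acc ++ ['_'] else acc) []

def env_phase_token_alt (name : String) : String :=
  -- single pass; then drop one trailing '_' (out[:-1]); Python raises on empty result: excluded by Pre_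
  String.ofList
    (if pvBLoop name ≠ [] ∧ PySem.List.pyGet? (pvBLoop name) (-1) = some '_'
     then PySem.List.slice (pvBLoop name) none (some (-1)) else pvBLoop name)

-- ===== PRECONDITION & SPEC =====
-- Pre_ excludes exactly the inputs on which A (and B) raise AssertionError:
-- names whose uppercased form contains no alphanumeric character.
def Pre_env_phase_token (name : String) : Prop :=
  ((PySem.Chars.upper name.toList).any PySem.Chars.isalnum) = true
instance (name : String) : Decidable (Pre_env_phase_token name) := by
  unfold Pre_env_phase_token; infer_instance

def pvWitness_env_phase_token : String := "a b"

def Spec_env_phase_token (name : String) (out : String) : Prop := out = env_phase_token_alt name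
instance (name : String) (out : String) : Decidable (Spec_env_phase_token name out) := by
  unfold Spec_env_phase_token; infer_instance

-- ===== CLAIM (what is proved, stated in full; the proofs are below) =====
def Claim_equal_env_phase_token : Prop := ∀ (name : String), Dom_env_phase_token name → Pre_env_phase_token name → Spec_env_phase_token name (env_phase_token name)

-- ===== LEMMAS AND PROOFS =====

-- the char A writes for ch: itself if alphanumeric, else '_'
def pvF (c : Char) : Char := if PySem.Chars.isalnum c then c else '_'

-- structural form of Python's s.split("_") on a char list
def pvSplit1 : List Char → List (List Char)
  | [] => [[]]
  | c :: rest => if c = '_' then [] :: pvSplit1 rest else (pvSplit1 rest).modifyHead (c :: ·)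

-- B's continuation: output still to come, given whether the last emitted char is '_'
def pvRest (u : Bool) : List Char → List Char
  | [] => []
  | c :: cs =>
    if PySem.Chars.isalnum c then c :: pvRest false cs
    else if u then pvRest true cs else '_' :: pvRest true cs

-- B's output before the trailing-underscore strip (empty-output start state)
def pvOutE : List Char → List Char
  | [] => []
  | c :: cs => if PySem.Chars.isalnum c then c :: pvRest false cs else pvOutE cs

-- drop a single trailing '_'
def pvStrip (xs : List Char) : List Char :=
  if xs.getLast? = some '_' then xs.dropLast else xs

-- A's word list: nonempty parts of split("_")
def pvW (cs : List Char) : List (List Char) :=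
  (pvSplit1 (cs.map pvF)).filter (fun part => part ≠ [])
-- same, but the (possibly empty) head part kept
def pvWh (cs : List Char) : List (List Char) :=
  (pvSplit1 (cs.map pvF)).headD [] :: ((pvSplit1 (cs.map pvF)).tail.filter (fun part => part ≠ []))

lemma pvSplit1_ne_nil : ∀ l : List Char, pvSplit1 l ≠ []
  | [] => by simp [pvSplit1]
  | c :: r => by
    simp only [pvSplit1]
    split
    · simp
    · cases hs : pvSplit1 r with
      | nil => exact absurd hs (pvSplit1_ne_nil r)
      | cons h t => simp

lemma pvGo_eq (fuel : Nat) (l cur : List Char) (acc : List (List Char)) (h : l.length < fuel) :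
    PySem.Chars.splitOn.go ['_'] fuel l cur acc
      = acc.reverse ++ (pvSplit1 l).modifyHead (cur.reverse ++ ·) := by
  induction fuel generalizing l cur acc with
  | zero => omega
  | succ fuel ih =>
    cases l with
    | nil => rw [PySem.Chars.splitOn.go.eq_def]; simp [pvSplit1]
    | cons c rest =>
      rw [PySem.Chars.splitOn.go.eq_def]
      simp only [List.length_cons] at h
      by_cases hc : c = '_'
      · subst hc
        have hpre : List.isPrefixOf ['_'] ('_' :: rest) = true := by simp [List.isPrefixOf]
        simp only [hpre, if_pos]
        rw [show List.drop (['_'] : List Char).length ('_' :: rest) = rest by simp]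
        rw [ih _ _ _ (by omega)]
        rcases hs : pvSplit1 rest with _ | ⟨hd, tl⟩
        · exact absurd hs (pvSplit1_ne_nil rest)
        · simp [pvSplit1, hs]
      · have hpre : List.isPrefixOf ['_'] (c :: rest) = false := by
          simp [List.isPrefixOf]; exact fun h => absurd h.symm hc
        simp only [hpre, Bool.false_eq_true, if_false]
        rw [ih _ _ _ (by omega)]
        simp only [pvSplit1, if_neg hc]
        rcases hs : pvSplit1 rest with _ | ⟨hd, tl⟩
        · exact absurd hs (pvSplit1_ne_nil rest)
        · simp

lemma pvSplitOn_eq (l : List Char) : PySem.Chars.splitOn l ['_'] = pvSplit1 l := by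
  rw [PySem.Chars.splitOn, pvGo_eq _ _ _ _ (by omega)]
  rcases hs : pvSplit1 l with _ | ⟨hd, tl⟩
  · exact absurd hs (pvSplit1_ne_nil l)
  · simp

lemma pvAlnum_ne_underscore {c : Char} (h : PySem.Chars.isalnum c = true) : c ≠ '_' := by
  intro he; subst he; exact absurd h (by decide)

lemma pvToken_eq (cs : List Char) :
    cs.foldl (fun acc ch => if PySem.Chars.isalnum ch then acc ++ [ch] else acc ++ ['_']) []
      = cs.map pvF := by
  have h : (fun (acc : List Char) ch => if PySem.Chars.isalnum ch then acc ++ [ch] else acc ++ ['_'])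
      = fun acc ch => acc ++ [pvF ch] := by
    funext acc ch; by_cases h : PySem.Chars.isalnum ch <;> simp [pvF, h]
  rw [h, PySem.List.foldl_append_singleton_eq_map]; simp

lemma pvStrip_cons {c : Char} {xs : List Char} (h : c ≠ '_' ∨ xs ≠ []) :
    pvStrip (c :: xs) = c :: pvStrip xs := by
  cases xs with
  | nil =>
    have hc : c ≠ '_' := h.resolve_right (by simp)
    simp [pvStrip, hc]
  | cons y t =>
    simp only [pvStrip, List.getLast?_cons_cons]
    split <;> simp

lemma pvJoin_modHead (c : Char) (h : List Char) (t : List (List Char)) :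
    PySem.Chars.join ['_'] ((c :: h) :: t) = c :: PySem.Chars.join ['_'] (h :: t) := by
  cases t with
  | nil => simp [PySem.Chars.join_singleton]
  | cons b t => rw [PySem.Chars.join_cons_cons, PySem.Chars.join_cons_cons]; simp

lemma pvJoin_nil_head (ws : List (List Char)) :
    PySem.Chars.join ['_'] ([] :: ws)
      = if ws = [] then [] else '_' :: PySem.Chars.join ['_'] ws := by
  cases ws with
  | nil => simp [PySem.Chars.join_singleton]
  | cons b t => rw [PySem.Chars.join_cons_cons]; simp

-- the two B-continuations produce exactly A's joined word list
lemma pvNEU : ∀ cs : List Char,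
    (pvStrip (pvRest false cs) = PySem.Chars.join ['_'] (pvWh cs)) ∧
    (pvStrip ('_' :: pvRest true cs)
      = if pvW cs = [] then [] else '_' :: PySem.Chars.join ['_'] (pvW cs)) := by
  intro cs
  induction cs with
  | nil =>
    constructor
    · simp [pvRest, pvStrip, pvWh, pvSplit1, PySem.Chars.join_singleton]
    · simp [pvRest, pvStrip, pvW, pvSplit1]
  | cons c cs ih =>
    obtain ⟨ihNE, ihU⟩ := ih
    rcases hs : pvSplit1 (cs.map pvF) with _ | ⟨h, t⟩
    · exact absurd hs (pvSplit1_ne_nil _)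
    by_cases hc : PySem.Chars.isalnum c = true
    · have hcu : c ≠ '_' := pvAlnum_ne_underscore hc
      have hS : pvSplit1 (pvF c :: List.map pvF cs) = (c :: h) :: t := by
        simp only [pvF, hc, if_pos, pvSplit1, if_neg hcu, hs, List.modifyHead]
      constructor
      · rw [show pvRest false (c :: cs) = c :: pvRest false cs by simp [pvRest, hc]]
        rw [pvStrip_cons (Or.inl hcu), ihNE]
        simp only [pvWh, List.map_cons, hS, hs, List.headD_cons, List.tail_cons]
        exact (pvJoin_modHead c h (t.filter _)).symm
      · rw [show pvRest true (c :: cs) = c :: pvRest false cs by simp [pvRest, hc]]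
        rw [pvStrip_cons (Or.inr (by simp)), pvStrip_cons (Or.inl hcu), ihNE]
        have hW : pvW (c :: cs) = (c :: h) :: t.filter (fun part => part ≠ []) := by
          simp [pvW, List.map_cons, hS]
        rw [hW]
        simp only [reduceCtorEq]
        rw [pvJoin_modHead]
        simp [pvWh, hs]
    · have hc' : PySem.Chars.isalnum c = false := by simpa using hc
      have hS : pvSplit1 (pvF c :: List.map pvF cs) = [] :: pvSplit1 (List.map pvF cs) := by
        simp [pvF, hc', pvSplit1]
      constructor
      · rw [show pvRest false (c :: cs) = '_' :: pvRest true cs by simp [pvRest, hc']]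
        rw [ihU]
        have hWh : pvWh (c :: cs) = [] :: pvW cs := by
          simp [pvWh, List.map_cons, hS, pvW, hs]
        rw [hWh, pvJoin_nil_head]
      · rw [show pvRest true (c :: cs) = pvRest true cs by simp [pvRest, hc']]
        rw [ihU]
        have hW : pvW (c :: cs) = pvW cs := by simp [pvW, List.map_cons, hS]
        rw [hW]

-- B's stripped state-machine output is A's collapsed string
lemma pvMain (cs : List Char) :
    pvStrip (pvOutE cs) = PySem.Chars.join ['_'] (pvW cs) := by
  induction cs with
  | nil => simp [pvOutE, pvStrip, pvW, pvSplit1]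
  | cons c cs ih =>
    rcases hs : pvSplit1 (cs.map pvF) with _ | ⟨h, t⟩
    · exact absurd hs (pvSplit1_ne_nil _)
    by_cases hc : PySem.Chars.isalnum c = true
    · have hcu : c ≠ '_' := pvAlnum_ne_underscore hc
      have hS : pvSplit1 (pvF c :: List.map pvF cs) = (c :: h) :: t := by
        simp only [pvF, hc, if_pos, pvSplit1, if_neg hcu, hs, List.modifyHead]
      rw [show pvOutE (c :: cs) = c :: pvRest false cs by simp [pvOutE, hc]]
      rw [pvStrip_cons (Or.inl hcu), (pvNEU cs).1]
      have hW : pvW (c :: cs) = (c :: h) :: t.filter (fun part => part ≠ []) := by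
        simp [pvW, List.map_cons, hS]
      rw [hW, pvJoin_modHead]
      simp [pvWh, hs]
    · have hc' : PySem.Chars.isalnum c = false := by simpa using hc
      have hS : pvSplit1 (pvF c :: List.map pvF cs) = [] :: pvSplit1 (List.map pvF cs) := by
        simp [pvF, hc', pvSplit1]
      rw [show pvOutE (c :: cs) = pvOutE cs by simp [pvOutE, hc'], ih]
      have hW : pvW (c :: cs) = pvW cs := by simp [pvW, List.map_cons, hS]
      rw [hW]

-- B's loop is the pvOutE/pvRest machine
lemma pvFold_rest : ∀ (cs acc : List Char) (u : Bool), acc ≠ [] →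
    ((acc.getLast? = some '_') ↔ u = true) →
    cs.foldl (fun acc ch =>
      if PySem.Chars.isalnum ch then acc ++ [ch]
      else if acc ≠ [] ∧ acc.getLast? ≠ some '_' then acc ++ ['_'] else acc) acc
      = acc ++ pvRest u cs := by
  intro cs
  induction cs with
  | nil => intro acc u _ _; simp [pvRest]
  | cons c cs ih =>
    intro acc u hne hu
    by_cases hc : PySem.Chars.isalnum c = true
    · rw [List.foldl_cons]
      simp only [hc, if_pos]
      rw [ih (acc ++ [c]) false (by simp) (by simp [pvAlnum_ne_underscore hc])]
      simp [pvRest, hc]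
    · have hc' : PySem.Chars.isalnum c = false := by simpa using hc
      rw [List.foldl_cons]
      simp only [hc', Bool.false_eq_true, if_false]
      cases u with
      | true =>
        have hl : acc.getLast? = some '_' := hu.mpr rfl
        rw [if_neg (by simp [hl])]
        rw [ih acc true hne hu]
        simp [pvRest, hc']
      | false =>
        have hl : acc.getLast? ≠ some '_' := by
          intro h; exact absurd (hu.mp h) (by simp)
        rw [if_pos ⟨hne, hl⟩]
        rw [ih (acc ++ ['_']) true (by simp) (by simp)]
        simp [pvRest, hc']

lemma pvFold_outE : ∀ cs : List Char,
    cs.foldl (fun acc ch =>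
      if PySem.Chars.isalnum ch then acc ++ [ch]
      else if acc ≠ [] ∧ acc.getLast? ≠ some '_' then acc ++ ['_'] else acc) []
      = pvOutE cs := by
  intro cs
  induction cs with
  | nil => simp [pvOutE]
  | cons c cs ih =>
    by_cases hc : PySem.Chars.isalnum c = true
    · rw [List.foldl_cons]
      simp only [hc, if_pos, List.nil_append]
      rw [pvFold_rest cs [c] false (by simp) (by simp [pvAlnum_ne_underscore hc])]
      simp [pvOutE, hc]
    · have hc' : PySem.Chars.isalnum c = false := by simpa using hc
      rw [List.foldl_cons]
      simp only [hc', Bool.false_eq_true, if_false, if_neg (by simp : ¬(([] : List Char) ≠ [] ∧ ([] : List Char).getLast? ≠ some '_'))]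
      rw [ih]
      simp only [pvOutE, hc', Bool.false_eq_true, if_false]

-- the port's trailing-underscore step is pvStrip
lemma pvFinal_eq_strip (xs : List Char) :
    (if xs ≠ [] ∧ PySem.List.pyGet? xs (-1) = some '_'
     then PySem.List.slice xs none (some (-1)) else xs) = pvStrip xs := by
  cases xs with
  | nil => simp [pvStrip]
  | cons y t =>
    have hget : PySem.List.pyGet? (y :: t) (-1) = (y :: t).getLast? := by
      simp [PySem.List.pyGet?, PySem.List.pyIdx?, List.getLast?_eq_getElem?]
    have hslice : PySem.List.slice (y :: t) none (some (-1)) = (y :: t).dropLast := by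
      simp [PySem.List.slice, List.dropLast_eq_take]
    simp only [hget, hslice, pvStrip]
    split <;> simp_all

-- ===== VERDICT (by name: the statement is the Claim_ definition above) =====
theorem env_phase_token_spec : Claim_equal_env_phase_token := by
  intro name _ _
  unfold Spec_env_phase_token env_phase_token env_phase_token_alt pvBLoop
  rw [pvToken_eq, pvSplitOn_eq, pvFold_outE, pvFinal_eq_strip, pvMain]
  rfl
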